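-- pv_equiv track=rewrite | github.com/TheGringo-ai/FixItFred | core/memory/universal_memory_system.py | _ai_generate_tags
-- ===== SOURCE A (Python) =====
-- from typing import Dict, List, Any, Optional, Union
--
-- def _ai_generate_tags(content: str, filename: str) -> List[str]:
--     """AI-generated tags based on content analysis"""
--     tags = []
--
--     # Basic keyword extraction
--     keywords = content.lower().split()
--     common_terms = {
--         "quality": ["quality", "inspection", "defect", "compliance"],
--         "safety": ["safety", "hazard", "risk", "incident"],
--         "maintenance": ["maintenance", "repair", "equipment", "failure"],
--         "training": ["training", "procedure", "manual", "guide"],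
--         "policy": ["policy", "procedure", "regulation", "standard"]
--     }
--
--     for category, terms in common_terms.items():
--         if any(term in keywords for term in terms):
--             tags.append(category)
--
--     # Add file-based tags
--     if "manual" in filename.lower():
--         tags.append("manual")
--     if "policy" in filename.lower():
--         tags.append("policy")
--     if "sop" in filename.lower():
--         tags.append("standard_operating_procedure")
--
--     return list(set(tags))
-- ===== SOURCE B (Python) =====
-- def _ai_generate_tags(content: str, filename: str) -> list:
--     """Tag generation via an inverted word->categories index: one pass over the
--     content words instead of per-category scans of the word list."""
--     index = {
--         "quality": ["quality"], "inspection": ["quality"], "defect": ["quality"],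
--         "compliance": ["quality"],
--         "safety": ["safety"], "hazard": ["safety"], "risk": ["safety"],
--         "incident": ["safety"],
--         "maintenance": ["maintenance"], "repair": ["maintenance"],
--         "equipment": ["maintenance"], "failure": ["maintenance"],
--         "training": ["training"], "procedure": ["training", "policy"],
--         "manual": ["training"], "guide": ["training"],
--         "policy": ["policy"], "regulation": ["policy"], "standard": ["policy"],
--     }
--     matched = set()
--     for word in content.lower().split():
--         matched.update(index.get(word, []))
--     tags = [c for c in ("quality", "safety", "maintenance", "training", "policy")
--             if c in matched]
--     fl = filename.lower()
--     if "manual" in fl: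
--         tags.append("manual")
--     if "policy" in fl:
--         tags.append("policy")
--     if "sop" in fl:
--         tags.append("standard_operating_procedure")
--     return list(set(tags))
-- ===== Notes on version B (the rewrite author's own statement) =====
-- stated objective: alternative
-- what changed: Replaces A's per-category any-scan of the keyword list (5 categories x 4 terms, each a scan of the words) with a precomputed inverted index mapping each keyword term to its categories ('procedure' to both training and policy), filled into a matched-set by a single pass over the content words; the filename checks and list(set(tags)) are unchanged.
import Mathlib
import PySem

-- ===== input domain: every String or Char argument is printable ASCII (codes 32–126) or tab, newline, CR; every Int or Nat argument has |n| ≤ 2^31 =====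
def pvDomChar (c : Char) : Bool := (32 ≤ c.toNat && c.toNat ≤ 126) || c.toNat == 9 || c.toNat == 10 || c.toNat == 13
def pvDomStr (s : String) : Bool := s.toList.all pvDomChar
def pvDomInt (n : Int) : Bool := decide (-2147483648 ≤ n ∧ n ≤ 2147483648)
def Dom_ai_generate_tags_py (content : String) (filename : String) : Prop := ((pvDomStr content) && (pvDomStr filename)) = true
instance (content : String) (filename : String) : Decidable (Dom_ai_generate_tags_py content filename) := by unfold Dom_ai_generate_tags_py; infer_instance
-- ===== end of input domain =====

-- B replaces A's per-category scans of the word list with a single pass over the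
-- content words through an inverted word->categories index (objective: alternative).
-- Both programs end with Python's list(set(tags)); the ports model it as first-insertion
-- order (PySem.Set.ofList), applied to the same tags list on both sides.


-- ===== PORT A =====
-- the dict literal common_terms, as an insertion-ordered association list (only iterated)
def pvCommonTerms : List (String × List String) :=
  [("quality", ["quality", "inspection", "defect", "compliance"]),
   ("safety", ["safety", "hazard", "risk", "incident"]),
   ("maintenance", ["maintenance", "repair", "equipment", "failure"]),
   ("training", ["training", "procedure", "manual", "guide"]),
   ("policy", ["policy", "procedure", "regulation", "standard"])]

def ai_generate_tags_py (content : String) (filename : String) : List String :=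
  -- keywords = content.lower().split()
  let keywords := PySem.Str.split₀ (PySem.Str.lower content)
  -- for category, terms in common_terms.items(): if any(term in keywords …): tags.append(category)
  let tags := pvCommonTerms.foldl
    (fun tags p => if p.2.any (fun t => keywords.contains t) then tags ++ [p.1] else tags) []
  let fl := PySem.Str.lower filename
  let tags := if PySem.Str.isIn "manual" fl then tags ++ ["manual"] else tags
  let tags := if PySem.Str.isIn "policy" fl then tags ++ ["policy"] else tags
  let tags := if PySem.Str.isIn "sop" fl then tags ++ ["standard_operating_procedure"] else tags
  -- return list(set(tags))
  PySem.Set.ofList tags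

-- ===== PORT B =====
-- Source B's inverted index word -> categories, an insertion-ordered dict
def pvTagIndex : PySem.Dict String (List String) := PySem.Dict.ofList
  [("quality", ["quality"]), ("inspection", ["quality"]), ("defect", ["quality"]),
   ("compliance", ["quality"]),
   ("safety", ["safety"]), ("hazard", ["safety"]), ("risk", ["safety"]),
   ("incident", ["safety"]),
   ("maintenance", ["maintenance"]), ("repair", ["maintenance"]),
   ("equipment", ["maintenance"]), ("failure", ["maintenance"]),
   ("training", ["training"]), ("procedure", ["training", "policy"]),
   ("manual", ["training"]), ("guide", ["training"]),
   ("policy", ["policy"]), ("regulation", ["policy"]), ("standard", ["policy"])]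

def ai_generate_tags_py_alt (content : String) (filename : String) : List String :=
  -- for word in content.lower().split(): matched.update(index.get(word, []))
  let matched : PySem.Set String :=
    (PySem.Str.split₀ (PySem.Str.lower content)).foldl
      (fun s w => PySem.Set.update s (PySem.Dict.getD pvTagIndex w [])) PySem.Set.empty
  -- tags = [c for c in (…) if c in matched]
  let tags := ["quality", "safety", "maintenance", "training", "policy"].filter
      (fun c => PySem.Set.contains matched c)
  let fl := PySem.Str.lower filename
  let tags := if PySem.Str.isIn "manual" fl then tags ++ ["manual"] else tags
  let tags := if PySem.Str.isIn "policy" fl then tags ++ ["policy"] else tags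
  let tags := if PySem.Str.isIn "sop" fl then tags ++ ["standard_operating_procedure"] else tags
  PySem.Set.ofList tags

-- ===== PRECONDITION & SPEC =====
def Spec_ai_generate_tags_py (content : String) (filename : String) (out : List String) : Prop := out = ai_generate_tags_py_alt content filename
instance (content : String) (filename : String) (out : List String) : Decidable (Spec_ai_generate_tags_py content filename out) := by unfold Spec_ai_generate_tags_py; infer_instance

-- ===== CLAIM (what is proved, stated in full; the proofs are below) =====
def Claim_equal_ai_generate_tags_py : Prop := ∀ (content : String) (filename : String), Dom_ai_generate_tags_py content filename → Spec_ai_generate_tags_py content filename (ai_generate_tags_py content filename)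

-- ===== LEMMAS AND PROOFS =====

-- the inverted index is exact: a category is in index[w] iff w is one of its terms
theorem pv_index_char (c : String) (terms : List String) (h : (c, terms) ∈ pvCommonTerms)
    (w : String) : c ∈ PySem.Dict.getD pvTagIndex w [] ↔ w ∈ terms := by
  fin_cases h <;>
  · simp [pvTagIndex, PySem.Dict.getD, PySem.Dict.get?, PySem.Dict.ofList, PySem.Dict.update,
          PySem.Dict.insert, PySem.Dict.empty, List.find?]
    (repeat' split) <;> simp_all <;> aesop

-- membership in B's accumulated set of matched categories
theorem pv_mem_matched (ws : List String) (s : PySem.Set String) (c : String) :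
    c ∈ ws.foldl (fun s w => PySem.Set.update s (PySem.Dict.getD pvTagIndex w [])) s ↔
      c ∈ s ∨ ∃ w ∈ ws, c ∈ PySem.Dict.getD pvTagIndex w [] := by
  induction ws generalizing s with
  | nil => simp
  | cons w ws ih => simp [List.foldl, ih, PySem.Set.mem_update]; tauto

-- B's membership test agrees with A's per-category scan of the word list
theorem pv_cond (kws : List String) (c : String) (terms : List String)
    (h : (c, terms) ∈ pvCommonTerms) :
    PySem.Set.contains
      (kws.foldl (fun s w => PySem.Set.update s (PySem.Dict.getD pvTagIndex w []))
        PySem.Set.empty) c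
      = terms.any (fun t => kws.contains t) := by
  rw [Bool.eq_iff_iff]
  simp only [PySem.Set.contains_iff, pv_mem_matched, PySem.Set.empty, List.any_eq_true,
    List.contains_iff_mem, List.not_mem_nil, false_or]
  constructor
  · rintro ⟨w, hw, hc⟩
    exact ⟨w, (pv_index_char c terms h w).mp hc, hw⟩
  · rintro ⟨t, ht, hk⟩
    exact ⟨t, hk, (pv_index_char c terms h t).mpr ht⟩

-- the two tags lists (before the filename checks) coincide
theorem pv_tags_eq (kws : List String) :
    pvCommonTerms.foldl
      (fun tags p => if p.2.any (fun t => kws.contains t) then tags ++ [p.1] else tags) [] =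
    (["quality", "safety", "maintenance", "training", "policy"]).filter
      (fun c => PySem.Set.contains
        (kws.foldl (fun s w => PySem.Set.update s (PySem.Dict.getD pvTagIndex w []))
          PySem.Set.empty) c) := by
  rw [PySem.List.foldl_append_if]
  simp only [List.nil_append, pvCommonTerms, List.filter]
  rw [pv_cond kws "quality" ["quality", "inspection", "defect", "compliance"] (by simp [pvCommonTerms]),
      pv_cond kws "safety" ["safety", "hazard", "risk", "incident"] (by simp [pvCommonTerms]),
      pv_cond kws "maintenance" ["maintenance", "repair", "equipment", "failure"] (by simp [pvCommonTerms]),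
      pv_cond kws "training" ["training", "procedure", "manual", "guide"] (by simp [pvCommonTerms]),
      pv_cond kws "policy" ["policy", "procedure", "regulation", "standard"] (by simp [pvCommonTerms])]
  generalize (["quality", "inspection", "defect", "compliance"].any (fun t => kws.contains t)) = b1
  generalize (["safety", "hazard", "risk", "incident"].any (fun t => kws.contains t)) = b2
  generalize (["maintenance", "repair", "equipment", "failure"].any (fun t => kws.contains t)) = b3
  generalize (["training", "procedure", "manual", "guide"].any (fun t => kws.contains t)) = b4
  generalize (["policy", "procedure", "regulation", "standard"].any (fun t => kws.contains t)) = b5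
  cases b1 <;> cases b2 <;> cases b3 <;> cases b4 <;> cases b5 <;> rfl

-- ===== VERDICT (by name: the statement is the Claim_ definition above) =====
theorem ai_generate_tags_py_spec : Claim_equal_ai_generate_tags_py := by
  intro content filename _
  show ai_generate_tags_py content filename = ai_generate_tags_py_alt content filename
  simp only [ai_generate_tags_py, ai_generate_tags_py_alt]
  rw [pv_tags_eq]
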